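-- pv_equiv track=rewrite | github.com/Threality/CollatzConjecture | SingleNumberTester.py | StepSim
-- ===== SOURCE A (Python) =====
-- def StepSim(num):
--     previouslyVisited = set({})
--     while num != 1:
--         if num in previouslyVisited:
--             return False
--         previouslyVisited.add(num)
--         if num % 2 == 0:
--             num //= 2
--         else:
--             num = 3 * num + 1
--     return True
-- ===== SOURCE B (Python) =====
-- def StepSim(num):
--     # Constant-memory cycle detection: instead of storing a visited set,
--     # replay the trajectory from the start to test whether the current
--     # value has occurred before (O(1) space, quadratic time).
--     cur = num
--     steps = 0
--     while cur != 1: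
--         t = num
--         for _ in range(steps):
--             if t == cur:
--                 return False
--             t = t // 2 if t % 2 == 0 else 3 * t + 1
--         steps += 1
--         cur = cur // 2 if cur % 2 == 0 else 3 * cur + 1
--     return True
-- ===== Notes on version B (the rewrite author's own statement) =====
-- stated objective: alternative
-- what changed: Replaces the growing visited-set with constant-memory cycle detection: each iteration replays the trajectory from the start to test whether the current value repeats, so no set is built or maintained.
import Mathlib
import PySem

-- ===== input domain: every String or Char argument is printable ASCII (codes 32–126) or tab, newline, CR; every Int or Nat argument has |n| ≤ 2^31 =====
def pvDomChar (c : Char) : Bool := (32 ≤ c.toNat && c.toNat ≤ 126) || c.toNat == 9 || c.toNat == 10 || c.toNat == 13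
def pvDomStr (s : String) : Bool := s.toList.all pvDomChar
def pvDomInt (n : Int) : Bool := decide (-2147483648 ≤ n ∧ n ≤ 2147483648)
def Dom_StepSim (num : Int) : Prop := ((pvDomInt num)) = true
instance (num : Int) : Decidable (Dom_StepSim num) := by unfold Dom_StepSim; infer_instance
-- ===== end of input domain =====

-- B replaces A's visited-set with constant-memory cycle detection by trajectory replay; same answers, O(1) space instead of a growing set.
-- Both ports run the (in principle unbounded) Python while-loop with the same large fuel bound; on every domain input the
-- loop finishes far within it, and the equivalence below is proved for every fuel, including exhaustion.

-- ===== PORT A =====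
-- the while-loop of A: fuel counts loop iterations
def pvLoopA (fuel : Nat) (visited : PySem.Set Int) (num : Int) : Bool :=
  match fuel with
  | 0 => false
  | f + 1 =>
    if num ≠ 1 then
      if PySem.Set.contains visited num then false
      else
        let visited' := PySem.Set.add visited num
        if PySem.Int.mod num 2 = 0 then pvLoopA f visited' (PySem.Int.floordiv num 2)
        else pvLoopA f visited' (3 * num + 1)
    else true

def StepSim (num : Int) : Bool := pvLoopA 100000 PySem.Set.empty num

-- ===== PORT B =====
-- Source B's inner for-loop: does cur occur among the first k trajectory values starting at t?
def pvReplay (t : Int) (k : Nat) (cur : Int) : Bool :=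
  match k with
  | 0 => false
  | k + 1 =>
    if t = cur then true
    else pvReplay (if PySem.Int.mod t 2 = 0 then PySem.Int.floordiv t 2 else 3 * t + 1) k cur

-- Source B's outer while-loop
def pvLoopB (fuel : Nat) (num : Int) (steps : Nat) (cur : Int) : Bool :=
  match fuel with
  | 0 => false
  | f + 1 =>
    if cur ≠ 1 then
      if pvReplay num steps cur then false
      else pvLoopB f num (steps + 1)
             (if PySem.Int.mod cur 2 = 0 then PySem.Int.floordiv cur 2 else 3 * cur + 1)
    else true

def StepSim_alt (num : Int) : Bool := pvLoopB 100000 num 0 num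

-- ===== PRECONDITION & SPEC =====
def Spec_StepSim (num : Int) (out : Bool) : Prop := out = StepSim_alt num
instance (num : Int) (out : Bool) : Decidable (Spec_StepSim num out) := by unfold Spec_StepSim; infer_instance

-- ===== CLAIM (what is proved, stated in full; the proofs are below) =====
def Claim_equal_StepSim : Prop := ∀ (num : Int), Dom_StepSim num → Spec_StepSim num (StepSim num)

-- ===== LEMMAS AND PROOFS =====

-- the Collatz step both programs apply
def pvStep (n : Int) : Int :=
  if PySem.Int.mod n 2 = 0 then PySem.Int.floordiv n 2 else 3 * n + 1

-- the k-th trajectory value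
def pvIter (t : Int) : Nat → Int
  | 0 => t
  | k + 1 => pvIter (pvStep t) k

lemma pvIter_succ_back (t : Int) (k : Nat) : pvIter t (k + 1) = pvStep (pvIter t k) := by
  induction k generalizing t with
  | zero => rfl
  | succ k ih => simpa [pvIter] using ih (pvStep t)

lemma pvReplay_succ (k : Nat) (t cur : Int) :
    pvReplay t (k + 1) cur = (pvReplay t k cur || decide (pvIter t k = cur)) := by
  induction k generalizing t with
  | zero => simp [pvReplay, pvIter]
  | succ k ih =>
    have h1 : pvReplay t (k + 1 + 1) cur
        = (if t = cur then true else pvReplay (pvStep t) (k + 1) cur) := rfl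
    have h2 : pvReplay t (k + 1) cur
        = (if t = cur then true else pvReplay (pvStep t) k cur) := rfl
    have h3 : pvIter t (k + 1) = pvIter (pvStep t) k := rfl
    rw [h1, h2, h3, ih (pvStep t)]
    by_cases h : t = cur <;> simp [h]

lemma contains_add_eq (s : PySem.Set Int) (x y : Int) :
    PySem.Set.contains (PySem.Set.add s x) y = (PySem.Set.contains s y || decide (x = y)) := by
  by_cases hy : y ∈ s
  · have h1 : PySem.Set.contains s y = true := (PySem.Set.contains_iff s y).2 hy
    have h2 : PySem.Set.contains (PySem.Set.add s x) y = true :=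
      (PySem.Set.contains_iff _ _).2 ((PySem.Set.mem_add s x y).2 (Or.inl hy))
    rw [h1, h2, Bool.true_or]
  · by_cases hxy : x = y
    · have h2 : PySem.Set.contains (PySem.Set.add s x) y = true :=
        (PySem.Set.contains_iff _ _).2 ((PySem.Set.mem_add s x y).2 (Or.inr hxy.symm))
      rw [h2]
      simp [hxy]
    · have h1 : PySem.Set.contains s y = false := by
        rw [← Bool.not_eq_true]
        intro h
        exact hy ((PySem.Set.contains_iff s y).1 h)
      have h2 : PySem.Set.contains (PySem.Set.add s x) y = false := by
        rw [← Bool.not_eq_true]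
        intro h
        rcases (PySem.Set.mem_add _ x y).1 ((PySem.Set.contains_iff _ _).1 h) with h' | h'
        · exact hy h'
        · exact hxy h'.symm
      rw [h1, h2]
      simp [hxy]

-- main bisimulation: A's loop with the visited set equals B's loop with trajectory replay
lemma loop_eq (fuel : Nat) (num : Int) :
    ∀ (vis : PySem.Set Int) (steps : Nat) (cur : Int),
      cur = pvIter num steps →
      (∀ x, PySem.Set.contains vis x = pvReplay num steps x) →
      pvLoopA fuel vis cur = pvLoopB fuel num steps cur := by
  induction fuel with
  | zero => intro vis steps cur _ _; rfl
  | succ f ih =>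
    intro vis steps cur hcur hvis
    by_cases h1 : cur = 1
    · simp [pvLoopA, pvLoopB, h1]
    · have ea : pvLoopA (f + 1) vis cur
          = (if PySem.Set.contains vis cur then false
             else if PySem.Int.mod cur 2 = 0 then
               pvLoopA f (PySem.Set.add vis cur) (PySem.Int.floordiv cur 2)
             else pvLoopA f (PySem.Set.add vis cur) (3 * cur + 1)) := by
        simp only [pvLoopA, if_pos (show cur ≠ 1 from h1)]
      have eb : pvLoopB (f + 1) num steps cur
          = (if pvReplay num steps cur then false
             else pvLoopB f num (steps + 1)
               (if PySem.Int.mod cur 2 = 0 then PySem.Int.floordiv cur 2 else 3 * cur + 1)) := by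
        simp only [pvLoopB, if_pos (show cur ≠ 1 from h1)]
      rw [ea, eb, hvis cur]
      by_cases hmem : pvReplay num steps cur = true
      · simp [hmem]
      · rw [if_neg hmem, if_neg hmem]
        have hrec : ∀ x, PySem.Set.contains (PySem.Set.add vis cur) x
            = pvReplay num (steps + 1) x := by
          intro x
          rw [contains_add_eq, hvis x, pvReplay_succ, ← hcur]
        have hstep : pvStep cur = pvIter num (steps + 1) := by
          rw [pvIter_succ_back, hcur]
        by_cases he : PySem.Int.mod cur 2 = 0
        · rw [if_pos he, if_pos he]
          refine ih (PySem.Set.add vis cur) (steps + 1) _ ?_ hrec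
          rw [← hstep]; unfold pvStep; rw [if_pos he]
        · rw [if_neg he, if_neg he]
          refine ih (PySem.Set.add vis cur) (steps + 1) _ ?_ hrec
          rw [← hstep]; unfold pvStep; rw [if_neg he]

-- ===== VERDICT (by name: the statement is the Claim_ definition above) =====
theorem StepSim_spec : Claim_equal_StepSim := by
  intro num _
  show StepSim num = StepSim_alt num
  unfold StepSim StepSim_alt
  exact loop_eq 100000 num PySem.Set.empty 0 num rfl (fun x => rfl)
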